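-- pv_equiv track=rewrite | github.com/j-balkovec/CPSC4260 | pylint/classify_radon_mi.py | rank_mi
-- ===== SOURCE A (Python) =====
-- def rank_mi(mi):
--     thresholds = {
--         "A": 85,
--         "B": 70,
--         "C": 60,
--         "D": 40,
--         "F": 0,
--     }
--     for rank in ["A", "B", "C", "D", "F"]:
--         if mi >= thresholds[rank]:
--             return rank
-- ===== SOURCE B (Python) =====
-- def rank_mi(mi):
--     bounds = [0, 40, 60, 70, 85]
--     letters = [None, "F", "D", "C", "B", "A"]
--     lo, hi = 0, len(bounds)
--     while lo < hi:
--         mid = (lo + hi) // 2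
--         if mi < bounds[mid]:
--             hi = mid
--         else:
--             lo = mid + 1
--     return letters[lo]
-- ===== Notes on version B (the rewrite author's own statement) =====
-- stated objective: alternative
-- what changed: Replaced the linear scan over rank letters with a hand-written bisect_right binary search into a sorted boundary table indexing a parallel letters array.
import Mathlib
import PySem

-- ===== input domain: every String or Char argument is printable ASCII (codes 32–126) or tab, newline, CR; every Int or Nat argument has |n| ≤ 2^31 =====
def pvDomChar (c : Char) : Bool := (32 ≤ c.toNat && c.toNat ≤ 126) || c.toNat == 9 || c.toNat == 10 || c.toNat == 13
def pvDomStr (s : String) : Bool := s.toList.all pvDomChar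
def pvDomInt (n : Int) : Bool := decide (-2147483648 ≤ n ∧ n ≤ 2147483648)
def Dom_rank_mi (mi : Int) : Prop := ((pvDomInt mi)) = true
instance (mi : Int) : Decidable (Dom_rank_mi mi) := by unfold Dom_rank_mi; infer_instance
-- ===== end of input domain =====

-- B replaces A's linear scan over rank letters by a bisect_right binary search
-- into a sorted boundary table with a parallel letters array (alternative algorithm).


-- ===== PORT A =====
-- A's for-loop over ["A","B","C","D","F"]: return the first rank whose threshold mi meets.
def rankLoop (thresholds : PySem.Dict String Int) (mi : Int) : List String → Option String
  | [] => none
  | r :: rs => if mi ≥ thresholds.getD r 0 then some r else rankLoop thresholds mi rs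

def rank_mi (mi : Int) : Option String :=
  let thresholds : PySem.Dict String Int :=
    ((((PySem.Dict.empty.insert "A" 85).insert "B" 70).insert "C" 60).insert "D" 40).insert "F" 0
  rankLoop thresholds mi ["A", "B", "C", "D", "F"]

-- ===== PORT B =====
-- B's while-loop: hand-written bisect_right binary search over the boundary table.
def bisectLoop (bounds : List Int) (mi : Int) (lo hi : Nat) : Nat :=
  if lo < hi then
    let mid := (lo + hi) / 2
    if mi < bounds.getD mid 0 then bisectLoop bounds mi lo mid
    else bisectLoop bounds mi (mid + 1) hi
  else lo
termination_by hi - lo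
decreasing_by all_goals omega

def rank_mi_alt (mi : Int) : Option String :=
  let bounds : List Int := [0, 40, 60, 70, 85]
  let letters : List (Option String) := [none, some "F", some "D", some "C", some "B", some "A"]
  letters.getD (bisectLoop bounds mi 0 bounds.length) none

-- ===== PRECONDITION & SPEC =====
def Spec_rank_mi (mi : Int) (out : Option String) : Prop := out = rank_mi_alt mi
instance (mi : Int) (out : Option String) : Decidable (Spec_rank_mi mi out) := by unfold Spec_rank_mi; infer_instance

-- ===== CLAIM (what is proved, stated in full; the proofs are below) =====
def Claim_equal_rank_mi : Prop := ∀ (mi : Int), Dom_rank_mi mi → Spec_rank_mi mi (rank_mi mi)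

-- ===== LEMMAS AND PROOFS =====

lemma alt_of_85 (mi : Int) (h : 85 ≤ mi) : rank_mi_alt mi = some "A" := by
  simp only [rank_mi_alt]
  rw [bisectLoop.eq_def]; norm_num [List.getD]
  rw [if_neg (by omega), bisectLoop.eq_def]; norm_num [List.getD]
  rw [if_neg (by omega), bisectLoop.eq_def]; norm_num [List.getD]

lemma alt_of_70 (mi : Int) (h1 : 70 ≤ mi) (h2 : mi < 85) : rank_mi_alt mi = some "B" := by
  simp only [rank_mi_alt]
  rw [bisectLoop.eq_def]; norm_num [List.getD]
  rw [if_neg (by omega), bisectLoop.eq_def]; norm_num [List.getD]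
  rw [if_pos (by omega), bisectLoop.eq_def]; norm_num [List.getD]
  rw [if_neg (by omega), bisectLoop.eq_def]; norm_num [List.getD]

lemma alt_of_60 (mi : Int) (h1 : 60 ≤ mi) (h2 : mi < 70) : rank_mi_alt mi = some "C" := by
  simp only [rank_mi_alt]
  rw [bisectLoop.eq_def]; norm_num [List.getD]
  rw [if_neg (by omega), bisectLoop.eq_def]; norm_num [List.getD]
  rw [if_pos (by omega), bisectLoop.eq_def]; norm_num [List.getD]
  rw [if_pos (by omega), bisectLoop.eq_def]; norm_num [List.getD]

lemma alt_of_40 (mi : Int) (h1 : 40 ≤ mi) (h2 : mi < 60) : rank_mi_alt mi = some "D" := by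
  simp only [rank_mi_alt]
  rw [bisectLoop.eq_def]; norm_num [List.getD]
  rw [if_pos (by omega), bisectLoop.eq_def]; norm_num [List.getD]
  rw [if_neg (by omega), bisectLoop.eq_def]; norm_num [List.getD]

lemma alt_of_0 (mi : Int) (h1 : 0 ≤ mi) (h2 : mi < 40) : rank_mi_alt mi = some "F" := by
  simp only [rank_mi_alt]
  rw [bisectLoop.eq_def]; norm_num [List.getD]
  rw [if_pos (by omega), bisectLoop.eq_def]; norm_num [List.getD]
  rw [if_pos (by omega), bisectLoop.eq_def]; norm_num [List.getD]
  rw [if_neg (by omega), bisectLoop.eq_def]; norm_num [List.getD]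

lemma alt_of_neg (mi : Int) (h : mi < 0) : rank_mi_alt mi = none := by
  simp only [rank_mi_alt]
  rw [bisectLoop.eq_def]; norm_num [List.getD]
  rw [if_pos (by omega), bisectLoop.eq_def]; norm_num [List.getD]
  rw [if_pos (by omega), bisectLoop.eq_def]; norm_num [List.getD]
  rw [if_pos (by omega), bisectLoop.eq_def]; norm_num [List.getD]

lemma rank_mi_eval (mi : Int) :
    rank_mi mi = if 85 ≤ mi then some "A" else if 70 ≤ mi then some "B"
      else if 60 ≤ mi then some "C" else if 40 ≤ mi then some "D"
      else if 0 ≤ mi then some "F" else none := by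
  have hA : (((((PySem.Dict.empty.insert "A" (85:Int)).insert "B" 70).insert "C" 60).insert "D" 40).insert "F" 0).getD "A" 0 = 85 := by decide
  have hB : (((((PySem.Dict.empty.insert "A" (85:Int)).insert "B" 70).insert "C" 60).insert "D" 40).insert "F" 0).getD "B" 0 = 70 := by decide
  have hC : (((((PySem.Dict.empty.insert "A" (85:Int)).insert "B" 70).insert "C" 60).insert "D" 40).insert "F" 0).getD "C" 0 = 60 := by decide
  have hD : (((((PySem.Dict.empty.insert "A" (85:Int)).insert "B" 70).insert "C" 60).insert "D" 40).insert "F" 0).getD "D" 0 = 40 := by decide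
  have hF : (((((PySem.Dict.empty.insert "A" (85:Int)).insert "B" 70).insert "C" 60).insert "D" 40).insert "F" 0).getD "F" 0 = 0 := by decide
  simp only [rank_mi, rankLoop, hA, hB, hC, hD, hF, ge_iff_le]

-- ===== VERDICT (by name: the statement is the Claim_ definition above) =====
theorem rank_mi_spec : Claim_equal_rank_mi := by
  intro mi _
  unfold Spec_rank_mi
  rw [rank_mi_eval]
  by_cases h85 : 85 ≤ mi
  · rw [alt_of_85 mi h85]; simp [h85]
  · by_cases h70 : 70 ≤ mi
    · rw [alt_of_70 mi h70 (by omega)]; simp [h85, h70]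
    · by_cases h60 : 60 ≤ mi
      · rw [alt_of_60 mi h60 (by omega)]; simp [h85, h70, h60]
      · by_cases h40 : 40 ≤ mi
        · rw [alt_of_40 mi h40 (by omega)]; simp [h85, h70, h60, h40]
        · by_cases h0 : 0 ≤ mi
          · rw [alt_of_0 mi h0 (by omega)]; simp [h85, h70, h60, h40, h0]
          · rw [alt_of_neg mi (by omega)]; simp [h85, h70, h60, h40, h0]
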